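-- pv_equiv track=rewrite | github.com/agustinfranco1/ayed1-2025-tps | TP6/ejercicio_6.py | asignar_habitaciones
-- ===== SOURCE A (Python) =====
-- from typing import List, Dict, Tuple
-- from typing import List, Dict, Tuple
--
-- def asignar_habitaciones(huespedes: List[List[str]]) -> Dict[str, Tuple[int, int]]:
--     """
--     Asigna habitaciones automaticamente a los huespedes.
--
--     Pre: huespedes debe ser una lista con registros del archivo CSV.
--
--     Post: devuelve un diccionario: {DNI: (piso, hab)}
--     """
--     asignaciones = {}
--     hab_usadas = set()
--
--     for reg in huespedes:
--         dni = reg[0]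
--         for piso in range(1, 11):
--             for hab in range(1, 7):
--                 if (piso, hab) not in hab_usadas:
--                     hab_usadas.add((piso, hab))
--                     asignaciones[dni] = (piso, hab)
--                     break
--             if dni in asignaciones:
--                 break
--
--     return asignaciones
-- ===== SOURCE B (Python) =====
-- from typing import List, Dict, Tuple
--
-- def asignar_habitaciones(huespedes: List[List[str]]) -> Dict[str, Tuple[int, int]]:
--     # one pass with a precomputed room table and a counter instead of
--     # rescanning all rooms from (1,1) for every guest
--     rooms = [(piso, hab) for piso in range(1, 11) for hab in range(1, 7)]
--     asignaciones = {}
--     i = 0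
--     for reg in huespedes:
--         if i < len(rooms):
--             asignaciones[reg[0]] = rooms[i]
--             i += 1
--     return asignaciones
-- ===== Notes on version B (the rewrite author's own statement) =====
-- stated objective: simpler
-- what changed: Replaces the per-guest nested rescan of all 60 rooms against a 'used' set by a precomputed room table consumed left-to-right with a single integer counter in one pass.
-- outside the precondition, e.g. on asignar_habitaciones([[]]): A raises IndexError, B raises IndexError
import Mathlib
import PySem

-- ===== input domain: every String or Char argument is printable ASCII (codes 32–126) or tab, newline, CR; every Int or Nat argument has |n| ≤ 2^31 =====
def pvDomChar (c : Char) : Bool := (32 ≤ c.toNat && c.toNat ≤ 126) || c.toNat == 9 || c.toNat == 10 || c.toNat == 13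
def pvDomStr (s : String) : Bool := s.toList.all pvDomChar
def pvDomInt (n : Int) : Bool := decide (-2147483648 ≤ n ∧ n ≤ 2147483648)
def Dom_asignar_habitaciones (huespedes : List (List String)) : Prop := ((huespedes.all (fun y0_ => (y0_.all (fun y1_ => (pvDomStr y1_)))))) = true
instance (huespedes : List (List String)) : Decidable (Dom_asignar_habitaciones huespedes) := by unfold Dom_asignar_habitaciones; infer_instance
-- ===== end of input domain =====

-- B replaces A's per-guest rescan of all rooms against a 'used' set by a precomputed
-- room table consumed left-to-right with a counter, in one pass (objective: simpler).

-- ===== PORT A =====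
-- inner 'for hab in range(1, 7): if (piso, hab) not in hab_usadas: add; assign; break'
def pvInnerHab (dni : String) (piso : Int) (habs : List Int)
    (asig : PySem.Dict String (Int × Int)) (usadas : PySem.Set (Int × Int)) :
    PySem.Dict String (Int × Int) × PySem.Set (Int × Int) :=
  match habs with
  | [] => (asig, usadas)
  | hab :: rest =>
    if PySem.Set.contains usadas (piso, hab) then
      pvInnerHab dni piso rest asig usadas
    else
      (asig.insert dni (piso, hab), PySem.Set.add usadas (piso, hab))

-- outer 'for piso in range(1, 11): …; if dni in asignaciones: break'
def pvPisoLoop (dni : String) (pisos : List Int)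
    (asig : PySem.Dict String (Int × Int)) (usadas : PySem.Set (Int × Int)) :
    PySem.Dict String (Int × Int) × PySem.Set (Int × Int) :=
  match pisos with
  | [] => (asig, usadas)
  | piso :: rest =>
    let st := pvInnerHab dni piso (PySem.List.pyRange 1 7 1) asig usadas
    if st.1.contains dni then st else pvPisoLoop dni rest st.1 st.2

-- loop body: 'dni = reg[0]' then the nested scan
def pvStepA (st : PySem.Dict String (Int × Int) × PySem.Set (Int × Int)) (reg : List String) :
    PySem.Dict String (Int × Int) × PySem.Set (Int × Int) :=
  match PySem.List.pyGet? reg 0 with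
  | none => st
  | some dni => pvPisoLoop dni (PySem.List.pyRange 1 11 1) st.1 st.2

def asignar_habitaciones (huespedes : List (List String)) : List (String × Int × Int) :=
  (huespedes.foldl pvStepA (PySem.Dict.empty, PySem.Set.empty)).1.items

-- ===== PORT B =====
-- rooms = [(piso, hab) for piso in range(1, 11) for hab in range(1, 7)]
def pvRooms : List (Int × Int) :=
  (PySem.List.pyRange 1 11 1).flatMap (fun piso => (PySem.List.pyRange 1 7 1).map (fun hab => (piso, hab)))

-- loop body: 'if i < len(rooms): asignaciones[reg[0]] = rooms[i]; i += 1'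
def pvStepB (st : PySem.Dict String (Int × Int) × Nat) (reg : List String) :
    PySem.Dict String (Int × Int) × Nat :=
  if st.2 < pvRooms.length then
    match PySem.List.pyGet? reg 0 with
    | none => st
    | some dni => (st.1.insert dni (pvRooms.getD st.2 (0, 0)), st.2 + 1)
  else st

def asignar_habitaciones_alt (huespedes : List (List String)) : List (String × Int × Int) :=
  (huespedes.foldl pvStepB (PySem.Dict.empty, 0)).1.items

-- ===== PRECONDITION & SPEC =====
-- Pre_ excludes records that are empty lists (A raises IndexError on reg[0]) and guest lists
-- longer than 6 that repeat a DNI: once floor 1 can be full, A's treatment of the repeated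
-- key (sometimes reassigning a floor-1 room, sometimes silently keeping the old entry) is an
-- accidental duplicate-key corner; with at most 6 guests the scan stays on floor 1 and the
-- two programs agree, so such lists are admitted even with duplicates.
def Pre_asignar_habitaciones (huespedes : List (List String)) : Prop :=
  (∀ reg ∈ huespedes, reg ≠ []) ∧
    ((huespedes.map (fun r => r.headD "")).Nodup ∨ huespedes.length ≤ 6)
instance (huespedes : List (List String)) : Decidable (Pre_asignar_habitaciones huespedes) := by
  unfold Pre_asignar_habitaciones; infer_instance

def pvWitness_asignar_habitaciones : List (List String) := [["1", "x"], ["2"]]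

def Spec_asignar_habitaciones (huespedes : List (List String)) (out : List (String × Int × Int)) : Prop := out = asignar_habitaciones_alt huespedes
instance (huespedes : List (List String)) (out : List (String × Int × Int)) : Decidable (Spec_asignar_habitaciones huespedes out) := by unfold Spec_asignar_habitaciones; infer_instance

-- ===== CLAIM (what is proved, stated in full; the proofs are below) =====
def Claim_equal_asignar_habitaciones : Prop := ∀ (huespedes : List (List String)), Dom_asignar_habitaciones huespedes → Pre_asignar_habitaciones huespedes → Spec_asignar_habitaciones huespedes (asignar_habitaciones huespedes)

-- ===== LEMMAS AND PROOFS =====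

theorem pv_find?_congr {α : Type} (l : List α) (p q : α → Bool)
    (h : ∀ x ∈ l, p x = q x) : l.find? p = l.find? q := by
  induction l with
  | nil => rfl
  | cons x t ih =>
    have hx := h x (by simp)
    rw [List.find?, List.find?, hx]
    cases q x with
    | true => rfl
    | false => exact ih (fun y hy => h y (by simp [hy]))

theorem pv_contains_eq_decide (s : PySem.Set (Int × Int)) (x : Int × Int) :
    PySem.Set.contains s x = decide (x ∈ s) := by
  by_cases h : x ∈ s <;> simp [h]

theorem pv_find?_not_mem_take :
    ∀ (l : List (Int × Int)), l.Nodup → ∀ n : Nat,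
      l.find? (fun r => !(PySem.Set.contains (l.take n) r)) = l[n]? := by
  intro l
  induction l with
  | nil => intro _ n; simp
  | cons x t ih =>
    intro hnd n
    cases n with
    | zero => simp [List.find?]
    | succ m =>
      have hxmem : (!(PySem.Set.contains ((x :: t).take (m + 1)) x)) = false := by
        rw [pv_contains_eq_decide]; simp [List.take]
      rw [List.find?]
      simp only [hxmem]
      have hxt : x ∉ t := (List.nodup_cons.mp hnd).1
      have hcongr : ∀ r ∈ t,
          (!(PySem.Set.contains ((x :: t).take (m + 1)) r)) =
          (!(PySem.Set.contains (t.take m) r)) := by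
        intro r hr
        have hrx : r ≠ x := fun h => hxt (h ▸ hr)
        rw [pv_contains_eq_decide, pv_contains_eq_decide]
        simp [List.take, hrx]
      rw [pv_find?_congr t _ _ hcongr, ih (List.nodup_cons.mp hnd).2 m]
      simp

theorem pv_innerHab_eq (dni : String) (piso : Int) (habs : List Int)
    (asig : PySem.Dict String (Int × Int)) (usadas : PySem.Set (Int × Int)) :
    pvInnerHab dni piso habs asig usadas =
      match habs.find? (fun h => !(PySem.Set.contains usadas (piso, h))) with
      | some h => (asig.insert dni (piso, h), PySem.Set.add usadas (piso, h))
      | none => (asig, usadas) := by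
  induction habs with
  | nil => rfl
  | cons hab rest ih =>
    rw [pvInnerHab, List.find?]
    cases hc : PySem.Set.contains usadas (piso, hab) with
    | true => simp only [if_true, Bool.not_true]; exact ih
    | false => simp

theorem pv_pisoLoop_eq (dni : String) (pisos : List Int)
    (asig : PySem.Dict String (Int × Int)) (usadas : PySem.Set (Int × Int))
    (hdni : asig.contains dni = false) :
    pvPisoLoop dni pisos asig usadas =
      match (pisos.flatMap (fun p => (PySem.List.pyRange 1 7 1).map (fun h => (p, h)))).find?
          (fun r => !(PySem.Set.contains usadas r)) with
      | some r => (asig.insert dni r, PySem.Set.add usadas r)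
      | none => (asig, usadas) := by
  induction pisos with
  | nil => rfl
  | cons piso rest ih =>
    rw [pvPisoLoop, pv_innerHab_eq, List.flatMap_cons, List.find?_append, List.find?_map]
    cases hf : (PySem.List.pyRange 1 7 1).find? (fun h => !(PySem.Set.contains usadas (piso, h))) with
    | some h =>
      simp only [Function.comp_def, hf, Option.map_some, Option.some_or]
      simp [PySem.Dict.contains_insert_self]
    | none =>
      simp only [Function.comp_def, hf, Option.map_none, Option.none_or]
      simp only [hdni, Bool.false_eq_true, if_false]
      exact ih

theorem pv_rooms_nodup : pvRooms.Nodup := by decide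

theorem pv_pisoLoop_take (dni : String) (asig : PySem.Dict String (Int × Int)) (n : Nat)
    (hdni : asig.contains dni = false) :
    pvPisoLoop dni (PySem.List.pyRange 1 11 1) asig (pvRooms.take n) =
      match pvRooms[n]? with
      | some r => (asig.insert dni r, PySem.Set.add (pvRooms.take n) r)
      | none => (asig, pvRooms.take n) := by
  rw [pv_pisoLoop_eq dni _ asig _ hdni]
  have hflat : (PySem.List.pyRange 1 11 1).flatMap
      (fun p => (PySem.List.pyRange 1 7 1).map (fun h => (p, h))) = pvRooms := rfl
  rw [hflat]
  rw [pv_find?_not_mem_take pvRooms pv_rooms_nodup n]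

theorem pv_add_take (n : Nat) (h : n < pvRooms.length) :
    PySem.Set.add (pvRooms.take n) pvRooms[n] = pvRooms.take (n + 1) := by
  have hnm : pvRooms[n] ∉ pvRooms.take n := by
    intro hmem
    obtain ⟨i, hi, heq⟩ := List.mem_iff_getElem.mp hmem
    have hlt : i < n := by rw [List.length_take] at hi; omega
    rw [List.getElem_take] at heq
    have : i = n := (List.Nodup.getElem_inj_iff pv_rooms_nodup).mp heq
    omega
  have hc : PySem.Set.contains (pvRooms.take n) pvRooms[n] = false := by
    rw [pv_contains_eq_decide]; simpa using hnm
  simp only [PySem.Set.add, hc, Bool.false_eq_true, if_false]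
  rw [List.take_add_one, List.getElem?_eq_getElem h]
  rfl

theorem pv_pisoLoop_take_lt (dni : String) (asig : PySem.Dict String (Int × Int)) (n : Nat)
    (hdni : asig.contains dni = false) (h : n < pvRooms.length) :
    pvPisoLoop dni (PySem.List.pyRange 1 11 1) asig (pvRooms.take n) =
      (asig.insert dni pvRooms[n], pvRooms.take (n + 1)) := by
  rw [pv_pisoLoop_take dni asig n hdni, List.getElem?_eq_getElem h]
  show (asig.insert dni pvRooms[n], PySem.Set.add (pvRooms.take n) pvRooms[n]) = _
  rw [pv_add_take n h]

theorem pv_pisoLoop_take_ge (dni : String) (asig : PySem.Dict String (Int × Int)) (n : Nat)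
    (hdni : asig.contains dni = false) (h : ¬ n < pvRooms.length) :
    pvPisoLoop dni (PySem.List.pyRange 1 11 1) asig (pvRooms.take n) =
      (asig, pvRooms.take n) := by
  rw [pv_pisoLoop_take dni asig n hdni, List.getElem?_eq_none (by omega)]

theorem pv_pyGet?_zero (reg : List String) (h : reg ≠ []) :
    PySem.List.pyGet? reg 0 = some (reg.headD "") := by
  cases reg with
  | nil => exact absurd rfl h
  | cons x t => simp [PySem.List.pyGet?, PySem.List.pyIdx?]

theorem pv_loop_eq : ∀ (hs : List (List String)) (asig : PySem.Dict String (Int × Int)) (n : Nat),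
    (∀ reg ∈ hs, reg ≠ []) →
    (hs.map (fun r => r.headD "")).Nodup →
    (∀ reg ∈ hs, asig.contains (reg.headD "") = false) →
    (hs.foldl pvStepA (asig, pvRooms.take n)).1 = (hs.foldl pvStepB (asig, n)).1 := by
  intro hs
  induction hs with
  | nil => intro asig n _ _ _; rfl
  | cons reg rest ih =>
    intro asig n hne hnd hfresh
    have hreg : reg ≠ [] := hne reg (by simp)
    have hdni : asig.contains (reg.headD "") = false := hfresh reg (by simp)
    rw [List.foldl_cons, List.foldl_cons]
    show ((rest.foldl pvStepA (pvStepA (asig, pvRooms.take n) reg)).1 = _)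
    rw [show pvStepA (asig, pvRooms.take n) reg =
        pvPisoLoop (reg.headD "") (PySem.List.pyRange 1 11 1) asig (pvRooms.take n) by
      simp [pvStepA, pv_pyGet?_zero reg hreg]]
    have hndrest : (rest.map (fun r => r.headD "")).Nodup := (List.nodup_cons.mp hnd).2
    have hhead : (reg.headD "") ∉ rest.map (fun r => r.headD "") := (List.nodup_cons.mp hnd).1
    by_cases h : n < pvRooms.length
    · rw [pv_pisoLoop_take_lt _ _ _ hdni h]
      have hB : pvStepB (asig, n) reg =
          (asig.insert (reg.headD "") pvRooms[n], n + 1) := by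
        simp [pvStepB, h, pv_pyGet?_zero reg hreg, List.getD_eq_getElem?_getD]
      rw [hB]
      apply ih _ (n + 1) (fun r hr => hne r (by simp [hr])) hndrest
      intro r hr
      rw [PySem.Dict.contains_insert]
      have hrx : r.headD "" ≠ reg.headD "" := by
        intro hcontra
        exact hhead (hcontra ▸ List.mem_map_of_mem hr)
      have h1 : ((r.headD "") == (reg.headD "")) = false := beq_eq_false_iff_ne.mpr hrx
      rw [h1, hfresh r (by simp [hr])]
      rfl
    · rw [pv_pisoLoop_take_ge _ _ _ hdni h]
      have hB : pvStepB (asig, n) reg = (asig, n) := by simp [pvStepB, h]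
      rw [hB]
      exact ih asig n (fun r hr => hne r (by simp [hr])) hndrest
        (fun r hr => hfresh r (by simp [hr]))

theorem pv_small_case (dni : String) (asig : PySem.Dict String (Int × Int))
    (u : PySem.Set (Int × Int)) (r : Int × Int)
    (h1 : (PySem.List.pyRange 1 7 1).find? (fun h => !(PySem.Set.contains u (r.1, h))) = some r.2)
    (h2 : r.1 = 1) :
    pvPisoLoop dni (PySem.List.pyRange 1 11 1) asig u =
      (asig.insert dni r, PySem.Set.add u r) := by
  obtain ⟨r1, r2⟩ := r
  subst h2
  rw [show PySem.List.pyRange 1 11 1 = (1 : Int) :: PySem.List.pyRange 2 11 1 from by decide]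
  rw [pvPisoLoop, pv_innerHab_eq, h1]
  simp [PySem.Dict.contains_insert_self]

theorem pv_find_small (n : Nat) (h : n < 6) :
    (PySem.List.pyRange 1 7 1).find?
        (fun h => !(PySem.Set.contains (pvRooms.take n) ((1 : Int), h))) = some ((n : Int) + 1) := by
  interval_cases n <;> decide

theorem pv_add_small (n : Nat) (h : n < 6) :
    PySem.Set.add (pvRooms.take n) ((1 : Int), (n : Int) + 1) = pvRooms.take (n + 1) := by
  interval_cases n <;> decide

theorem pv_getD_small (n : Nat) (h : n < 6) :
    pvRooms.getD n (0, 0) = ((1 : Int), (n : Int) + 1) := by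
  interval_cases n <;> decide

theorem pv_pisoLoop_small (dni : String) (asig : PySem.Dict String (Int × Int)) (n : Nat)
    (h : n < 6) :
    pvPisoLoop dni (PySem.List.pyRange 1 11 1) asig (pvRooms.take n) =
      (asig.insert dni (pvRooms.getD n (0, 0)), pvRooms.take (n + 1)) := by
  rw [pv_small_case dni asig (pvRooms.take n) ((1 : Int), (n : Int) + 1) (pv_find_small n h) rfl]
  rw [pv_add_small n h, pv_getD_small n h]

theorem pv_loop_eq_small : ∀ (hs : List (List String)) (asig : PySem.Dict String (Int × Int))
    (n : Nat), n + hs.length ≤ 6 → (∀ reg ∈ hs, reg ≠ []) →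
    (hs.foldl pvStepA (asig, pvRooms.take n)).1 = (hs.foldl pvStepB (asig, n)).1 := by
  intro hs
  induction hs with
  | nil => intro asig n _ _; rfl
  | cons reg rest ih =>
    intro asig n hlen hne
    have hreg : reg ≠ [] := hne reg (by simp)
    have h6 : n < 6 := by simp at hlen; omega
    rw [List.foldl_cons, List.foldl_cons]
    rw [show pvStepA (asig, pvRooms.take n) reg =
        pvPisoLoop (reg.headD "") (PySem.List.pyRange 1 11 1) asig (pvRooms.take n) by
      simp [pvStepA, pv_pyGet?_zero reg hreg]]
    rw [pv_pisoLoop_small _ _ _ h6]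
    have hlt : n < pvRooms.length := by
      have : pvRooms.length = 60 := by decide
      omega
    rw [show pvStepB (asig, n) reg =
        (asig.insert (reg.headD "") (pvRooms.getD n (0, 0)), n + 1) by
      simp [pvStepB, hlt, pv_pyGet?_zero reg hreg]]
    exact ih _ (n + 1) (by simp at hlen ⊢; omega) (fun r hr => hne r (by simp [hr]))

-- ===== VERDICT (by name: the statement is the Claim_ definition above) =====
theorem asignar_habitaciones_spec : Claim_equal_asignar_habitaciones := by
  intro hs _ hpre
  unfold Spec_asignar_habitaciones asignar_habitaciones asignar_habitaciones_alt
  congr 1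
  have h0 : (PySem.Set.empty : PySem.Set (Int × Int)) = pvRooms.take 0 := rfl
  rw [h0]
  rcases hpre.2 with hnd | hlen
  · exact pv_loop_eq hs PySem.Dict.empty 0 hpre.1 hnd
      (fun reg _ => PySem.Dict.contains_empty _)
  · exact pv_loop_eq_small hs PySem.Dict.empty 0 (by omega) hpre.1
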